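-- pv_equiv track=rewrite | github.com/qgasdg/Inha_DataStructure | student_week4_problem2.py | findVisitOrder
-- ===== SOURCE A (Python) =====
-- def findVisitOrder(n, x, y):
--     #base case : n = 0, 탐색 순서에 대한 인덱스가 1부터 시작하므로 모든 값에 1을 더해야 함
--     if n == 0:
--         return 1
--
--     #한 변의 길이가 2^n인 정사각형을 네 쿼터로 나누는 코드
--     quarter_size = 2**(n-1)
--     x_quarter = x//quarter_size
--     y_quarter = y//quarter_size
--     #각 쿼터의 방문 순서는 앞서 진행한 쿼터를 모두 더해야 하므로 각 쿼터 길이의 제곱을 사용해야 함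
--     quarter_size_square = quarter_size**2
--
--
--     #쿼터의 위치에 따른 방문 순서 값을 더함. 재귀호출의 모듈러 연산은 quarter_size를 초과하는 행 또는 열 인덱스를 정규화하기 위함
--     if x_quarter == 0 and y_quarter == 0:
--         return quarter_size_square*2 + findVisitOrder(n-1, x%quarter_size, y%quarter_size)
--
--     elif x_quarter == 1 and y_quarter == 0:
--         return quarter_size_square*3 + findVisitOrder(n-1, x%quarter_size, y%quarter_size)
--
--     elif x_quarter == 0 and y_quarter == 1:
--         return quarter_size_square*1 + findVisitOrder(n-1, x%quarter_size, y%quarter_size)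
--
--     elif x_quarter == 1 and y_quarter == 1:
--         return findVisitOrder(n-1, x%quarter_size, y%quarter_size)
-- ===== SOURCE B (Python) =====
-- def findVisitOrder(n, x, y):
--     # Iterative base-4 accumulation: one loop over the bit levels instead of recursion.
--     result = 1
--     for level in reversed(range(n)):
--         qs = 2 ** level
--         xq, yq = x // qs, y // qs
--         result += qs * qs * (2 + xq if yq == 0 else 1 - xq)
--         x %= qs
--         y %= qs
--     return result
-- ===== Notes on version B (the rewrite author's own statement) =====
-- stated objective: alternative
-- what changed: Replaces the recursive quadrant subdivision with an explicit iterative loop over the bit levels (reversed(range(n))) that accumulates the base-4 coefficient, computed arithmetically as 2+xq if yq==0 else 1-xq instead of a four-way branch, reducing x,y by modulo at each level.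
-- outside the precondition, e.g. on findVisitOrder(1, 2, 0): A returns None, B returns 5; on findVisitOrder(-1, 0, 0): A raises ZeroDivisionError, B returns 1
import Mathlib
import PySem

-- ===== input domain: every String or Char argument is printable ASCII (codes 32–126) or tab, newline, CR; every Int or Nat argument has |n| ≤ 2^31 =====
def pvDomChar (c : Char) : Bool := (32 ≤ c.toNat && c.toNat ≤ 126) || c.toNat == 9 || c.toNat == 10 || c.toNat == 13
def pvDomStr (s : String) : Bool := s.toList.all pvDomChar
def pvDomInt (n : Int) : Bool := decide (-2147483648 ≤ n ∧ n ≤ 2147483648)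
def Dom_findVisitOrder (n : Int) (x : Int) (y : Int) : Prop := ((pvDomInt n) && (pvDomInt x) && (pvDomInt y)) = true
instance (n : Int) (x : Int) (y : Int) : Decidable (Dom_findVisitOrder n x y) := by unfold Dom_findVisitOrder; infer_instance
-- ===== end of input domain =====

-- B re-implements the recursion as an iterative loop over the bit levels (alternative decomposition, same cost).

-- ===== PORT A =====
-- Recursion on the fuel n.toNat; exact for n ≥ 0 (Pre_). For n < 0 Python A recurses forever (excluded by Pre_).
def findVisitOrderAux : Nat → Int → Int → Int
  | 0, _, _ => 1
  | m + 1, x, y =>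
    let quarter_size : Int := 2 ^ m
    let x_quarter := PySem.Int.floordiv x quarter_size
    let y_quarter := PySem.Int.floordiv y quarter_size
    let quarter_size_square := quarter_size ^ 2
    if x_quarter = 0 ∧ y_quarter = 0 then
      quarter_size_square * 2 + findVisitOrderAux m (PySem.Int.mod x quarter_size) (PySem.Int.mod y quarter_size)
    else if x_quarter = 1 ∧ y_quarter = 0 then
      quarter_size_square * 3 + findVisitOrderAux m (PySem.Int.mod x quarter_size) (PySem.Int.mod y quarter_size)
    else if x_quarter = 0 ∧ y_quarter = 1 then
      quarter_size_square * 1 + findVisitOrderAux m (PySem.Int.mod x quarter_size) (PySem.Int.mod y quarter_size)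
    else if x_quarter = 1 ∧ y_quarter = 1 then
      findVisitOrderAux m (PySem.Int.mod x quarter_size) (PySem.Int.mod y quarter_size)
    else 0 -- Python falls off the end and returns None here: excluded by Pre_

def findVisitOrder (n : Int) (x : Int) (y : Int) : Int := findVisitOrderAux n.toNat x y

-- ===== PORT B =====
-- Iterative loop: for level in reversed(range(n)). level ≥ 0 inside the loop, so 2 ** level = 2 ^ level.toNat exactly.
def findVisitOrder_alt (n : Int) (x : Int) (y : Int) : Int :=
  ((PySem.List.pyRange 0 n 1).reverse.foldl
    (fun (st : Int × Int × Int) (level : Int) =>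
      let qs : Int := 2 ^ level.toNat
      let xq := PySem.Int.floordiv st.2.1 qs
      let yq := PySem.Int.floordiv st.2.2 qs
      (st.1 + qs * qs * (if yq = 0 then 2 + xq else 1 - xq),
       PySem.Int.mod st.2.1 qs, PySem.Int.mod st.2.2 qs))
    (1, x, y)).1

-- ===== PRECONDITION & SPEC =====
-- Pre_ excludes inputs where A does not return an int: n < 0 (A recurses forever), and n > 0 with
-- x or y outside [0, 2^n) (the top-level quadrant test matches no branch and A returns None).
def Pre_findVisitOrder (n : Int) (x : Int) (y : Int) : Prop :=
  0 ≤ n ∧ (n = 0 ∨ (0 ≤ x ∧ x < 2 ^ n.toNat ∧ 0 ≤ y ∧ y < 2 ^ n.toNat))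
instance (n : Int) (x : Int) (y : Int) : Decidable (Pre_findVisitOrder n x y) := by
  unfold Pre_findVisitOrder; infer_instance
def pvWitness_findVisitOrder : Int × Int × Int := (2, 1, 3)

def Spec_findVisitOrder (n : Int) (x : Int) (y : Int) (out : Int) : Prop := out = findVisitOrder_alt n x y
instance (n : Int) (x : Int) (y : Int) (out : Int) : Decidable (Spec_findVisitOrder n x y out) := by
  unfold Spec_findVisitOrder; infer_instance

-- ===== CLAIM (what is proved, stated in full; the proofs are below) =====
def Claim_equal_findVisitOrder : Prop := ∀ (n : Int) (x : Int) (y : Int), Dom_findVisitOrder n x y → Pre_findVisitOrder n x y → Spec_findVisitOrder n x y (findVisitOrder n x y)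

-- ===== LEMMAS AND PROOFS =====

-- Characterise the quotient/remainder for x ∈ [0, 2*qs).
lemma fd01 (qs x : Int) (h0 : 0 < qs) (hx0 : 0 ≤ x) (hx : x < 2 * qs) :
    (x < qs ∧ PySem.Int.floordiv x qs = 0 ∧ PySem.Int.mod x qs = x) ∨
    (qs ≤ x ∧ PySem.Int.floordiv x qs = 1 ∧ PySem.Int.mod x qs = x - qs) := by
  have hsum := PySem.Int.floordiv_mul_add_mod x qs
  rcases lt_or_ge x qs with h | h
  · left
    have hq : PySem.Int.floordiv x qs = 0 := by
      rw [PySem.Int.floordiv_eq_iff_of_pos h0]; constructor <;> omega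
    refine ⟨h, hq, ?_⟩; rw [hq] at hsum; omega
  · right
    have hq : PySem.Int.floordiv x qs = 1 := by
      rw [PySem.Int.floordiv_eq_iff_of_pos h0]; constructor <;> omega
    refine ⟨h, hq, ?_⟩; rw [hq] at hsum; omega

-- Loop invariant: the fold over levels m-1 … 0 adds exactly findVisitOrderAux m x y - 1 to the accumulator.
lemma loop_eq (m : Nat) : ∀ (r x y : Int), 0 ≤ x → x < 2 ^ m → 0 ≤ y → y < 2 ^ m →
    ((PySem.List.pyRange 0 (m : Int) 1).reverse.foldl
      (fun (st : Int × Int × Int) (level : Int) =>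
        let qs : Int := 2 ^ level.toNat
        let xq := PySem.Int.floordiv st.2.1 qs
        let yq := PySem.Int.floordiv st.2.2 qs
        (st.1 + qs * qs * (if yq = 0 then 2 + xq else 1 - xq),
         PySem.Int.mod st.2.1 qs, PySem.Int.mod st.2.2 qs))
      (r, x, y)).1 = r + findVisitOrderAux m x y - 1 := by
  induction m with
  | zero =>
    intro r x y _ _ _ _
    simp [PySem.List.pyRange_one_eq_nil, findVisitOrderAux]
  | succ m ih =>
    intro r x y hx0 hx hy0 hy
    have hsplit : PySem.List.pyRange 0 ((m + 1 : Nat) : Int) 1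
        = PySem.List.pyRange 0 (m : Int) 1 ++ [(m : Int)] := by
      have := PySem.List.pyRange_one_succ_right (a := 0) (b := (m : Int)) (by positivity)
      simpa using this
    rw [hsplit, List.reverse_append]
    simp only [List.reverse_singleton, List.singleton_append, List.foldl_cons]
    have hqs : (0 : Int) < 2 ^ m := by positivity
    have hm : ((m : Int)).toNat = m := by simp
    have hx2 : x < 2 * 2 ^ m := by
      have : (2 : Int) ^ (m + 1) = 2 * 2 ^ m := by ring
      omega
    have hy2 : y < 2 * 2 ^ m := by
      have : (2 : Int) ^ (m + 1) = 2 * 2 ^ m := by ring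
      omega
    have hxm0 : 0 ≤ PySem.Int.mod x (2 ^ m) := PySem.Int.mod_nonneg x hqs
    have hxml : PySem.Int.mod x (2 ^ m) < 2 ^ m := PySem.Int.mod_lt x hqs
    have hym0 : 0 ≤ PySem.Int.mod y (2 ^ m) := PySem.Int.mod_nonneg y hqs
    have hyml : PySem.Int.mod y (2 ^ m) < 2 ^ m := PySem.Int.mod_lt y hqs
    rcases fd01 (2 ^ m) x hqs hx0 hx2 with ⟨_, hqx, _⟩ | ⟨_, hqx, _⟩ <;>
      rcases fd01 (2 ^ m) y hqs hy0 hy2 with ⟨_, hqy, _⟩ | ⟨_, hqy, _⟩ <;>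
      · have hqx' := hqx
        have hqy' := hqy
        rw [PySem.Int.floordiv_eq_ediv_of_pos hqs] at hqx' hqy'
        simp only [hm, hqx, hqy]
        rw [ih _ _ _ hxm0 hxml hym0 hyml]
        simp [findVisitOrderAux, hqx', hqy']
        try ring

-- ===== VERDICT (by name: the statement is the Claim_ definition above) =====
theorem findVisitOrder_spec : Claim_equal_findVisitOrder := by
  intro n x y _ hpre
  obtain ⟨hn, hcase⟩ := hpre
  unfold Spec_findVisitOrder findVisitOrder findVisitOrder_alt
  have hcast : n = ((n.toNat : Nat) : Int) := by omega
  rcases hcase with h0 | ⟨hx0, hx, hy0, hy⟩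
  · subst h0
    simp [PySem.List.pyRange_one_eq_nil, findVisitOrderAux]
  · have h := loop_eq n.toNat 1 x y hx0 hx hy0 hy
    rw [← hcast] at h
    rw [h]
    ring
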